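-- pv_equiv track=rewrite | github.com/SKNETWORKS-FAMILY-AICAMP/SKN19-FINAL-1Team | app/rag/cache/card_cache.py | _cards_by_id
-- ===== SOURCE A (Python) =====
-- from typing import Any, Dict, List, Optional, Tuple
--
-- def _cards_by_id(cards: List[Dict[str, Any]]) -> Dict[str, Dict[str, Any]]:
--     mapping: Dict[str, Dict[str, Any]] = {}
--     for card in cards:
--         card_id = str(card.get("id") or "")
--         if not card_id or card_id in mapping:
--             continue
--         mapping[card_id] = card
--     return mapping
-- ===== SOURCE B (Python) =====
-- from typing import Any, Dict, List
--
-- def _cards_by_id(cards: List[Dict[str, Any]]) -> Dict[str, Dict[str, Any]]: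
--     # Pass 1: reversed overwrite pass -> value for each id is its FIRST card.
--     # Pass 2: rebuild in first-occurrence key order, no 'already seen' guard anywhere.
--     ids = [str(card.get("id") or "") for card in cards]
--     first: Dict[str, Dict[str, Any]] = {}
--     for cid, card in zip(reversed(ids), reversed(cards)):
--         if cid:
--             first[cid] = card
--     return {cid: first[cid] for cid in ids if cid}
-- ===== Notes on version B (the rewrite author's own statement) =====
-- stated objective: alternative
-- what changed: Replaces the single guarded loop maintaining an 'already seen' membership check with two guard-free passes: a reversed overwrite pass that makes each id map to its first card, then a forward rebuild in first-occurrence key order.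
import Mathlib
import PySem

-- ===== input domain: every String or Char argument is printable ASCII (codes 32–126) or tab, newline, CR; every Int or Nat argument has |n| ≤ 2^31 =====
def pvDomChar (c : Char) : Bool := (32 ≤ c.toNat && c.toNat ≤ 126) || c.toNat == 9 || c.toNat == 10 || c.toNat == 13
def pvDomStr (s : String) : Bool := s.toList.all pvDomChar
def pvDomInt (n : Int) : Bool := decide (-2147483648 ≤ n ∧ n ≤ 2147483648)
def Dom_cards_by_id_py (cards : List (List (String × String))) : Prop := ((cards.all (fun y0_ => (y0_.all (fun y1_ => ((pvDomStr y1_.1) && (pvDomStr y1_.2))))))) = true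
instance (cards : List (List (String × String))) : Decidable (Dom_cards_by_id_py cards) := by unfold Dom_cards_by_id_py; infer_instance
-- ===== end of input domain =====

-- B replaces A's single guarded loop (with its 'already in mapping' membership check) by two
-- guard-free passes: a reversed overwrite pass giving each id its first card, then a forward
-- rebuild in first-occurrence key order (objective: alternative decomposition, same cost).

-- ===== PORT A =====
-- `card.get("id") or ""` : values here are strings, so `or` only turns None into "" — getD "".
def cards_by_id_py (cards : List (List (String × String))) : List (String × List (String × String)) :=
  (cards.foldl
    (fun mapping card =>
      let card_id := ((PySem.Dict.mk card).get? "id").getD ""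
      if card_id == "" || mapping.contains card_id then mapping
      else mapping.insert card_id card)
    PySem.Dict.empty).items

-- ===== PORT B =====
-- first[cid] in the comprehension can never raise KeyError (cid comes from ids and is nonempty),
-- so it is ported as get? + getD [].
def cards_by_id_py_alt (cards : List (List (String × String))) : List (String × List (String × String)) :=
  let ids := cards.map (fun card => ((PySem.Dict.mk card).get? "id").getD "")
  let first := (ids.reverse.zip cards.reverse).foldl
    (fun first p => if p.1 == "" then first else first.insert p.1 p.2)
    PySem.Dict.empty
  (ids.foldl
    (fun m cid => if cid == "" then m else m.insert cid ((first.get? cid).getD []))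
    PySem.Dict.empty).items

-- ===== PRECONDITION & SPEC =====
def Spec_cards_by_id_py (cards : List (List (String × String))) (out : List (String × List (String × String))) : Prop := out = cards_by_id_py_alt cards
instance (cards : List (List (String × String))) (out : List (String × List (String × String))) : Decidable (Spec_cards_by_id_py cards out) := by unfold Spec_cards_by_id_py; infer_instance

-- ===== CLAIM (what is proved, stated in full; the proofs are below) =====
def Claim_equal_cards_by_id_py : Prop := ∀ (cards : List (List (String × String))), Dom_cards_by_id_py cards → Spec_cards_by_id_py cards (cards_by_id_py cards)

-- ===== LEMMAS AND PROOFS =====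

-- id of a card, and the (id, card) pair list both programs conceptually traverse
def pvCid (card : List (String × String)) : String := ((PySem.Dict.mk card).get? "id").getD ""
def pvPairs (cards : List (List (String × String))) : List (String × List (String × String)) :=
  cards.map (fun c => (pvCid c, c))

-- a loop that skips elements with p is the plain loop over the filtered list
theorem pv_foldl_skip_filter {α β : Type} (p : β → Bool) (g : α → β → α) (l : List β) (a : α) :
    l.foldl (fun m x => if p x then m else g m x) a = (l.filter (fun x => !p x)).foldl g a := by
  induction l generalizing a with
  | nil => rfl
  | cons x xs ih =>
    by_cases h : p x <;> simp [List.foldl_cons, h, ih]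

-- A's loop is the insert-if-new loop over the nonempty-id pairs
theorem pvA_loop (cards : List (List (String × String)))
    (d : PySem.Dict String (List (String × String))) :
    cards.foldl
      (fun mapping card =>
        let card_id := ((PySem.Dict.mk card).get? "id").getD ""
        if card_id == "" || mapping.contains card_id then mapping
        else mapping.insert card_id card) d
    = ((pvPairs cards).filter (fun q => !(q.1 == ""))).foldl
        (fun m q => if m.contains q.1 then m else m.insert q.1 q.2) d := by
  induction cards generalizing d with
  | nil => rfl
  | cons c cs ih =>
    simp only [pvPairs, pvCid, List.map_cons, List.filter_cons, List.foldl_cons]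
    by_cases h : ((PySem.Dict.mk c).get? "id").getD "" = ""
    · simp only [h]
      simpa [pvPairs, pvCid] using ih d
    · by_cases hc : d.contains (((PySem.Dict.mk c).get? "id").getD "")
      · simpa [pvPairs, pvCid, h, hc] using ih d
      · simpa [pvPairs, pvCid, h, hc] using
          ih (d.insert (((PySem.Dict.mk c).get? "id").getD "") c)

-- lookup after an insert-if-new loop: first match in the list, unless d already had the key
theorem pv_get?_foldl_insNew {κ ν : Type} [BEq κ] [LawfulBEq κ]
    (qs : List (κ × ν)) (d : PySem.Dict κ ν) (k : κ) :
    (qs.foldl (fun m q => if m.contains q.1 then m else m.insert q.1 q.2) d).get? k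
      = (d.get? k).or ((qs.find? (fun q => q.1 == k)).map (·.2)) := by
  induction qs generalizing d with
  | nil => simp
  | cons q qs ih =>
    by_cases hc : d.contains q.1
    · have hs : (d.get? q.1).isSome := by
        rw [PySem.Dict.contains_eq_isSome_get?] at hc; exact hc
      by_cases hk : q.1 = k
      · subst hk
        obtain ⟨v, hv⟩ := Option.isSome_iff_exists.mp hs
        simp [List.foldl_cons, hc, ih, hv]
      · simp [List.foldl_cons, hc, ih, hk]
    · have hc' : d.contains q.1 = false := by simpa using hc
      by_cases hk : q.1 = k
      · subst hk
        have hn : d.get? q.1 = none := by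
          rw [PySem.Dict.get?_eq_none_iff_contains]; exact hc'
        simp [List.foldl_cons, hc, ih, hn, PySem.Dict.get?_insert_self]
      · simp [List.foldl_cons, hc, ih, hk,
          PySem.Dict.get?_insert_of_ne d q.2 (Ne.symm hk)]

-- lookup after an unconditional overwrite loop: last match wins
theorem pv_get?_foldl_insAll {κ ν : Type} [BEq κ] [LawfulBEq κ]
    (qs : List (κ × ν)) (d : PySem.Dict κ ν) (k : κ) :
    (qs.foldl (fun m q => m.insert q.1 q.2) d).get? k
      = ((qs.reverse.find? (fun q => q.1 == k)).map (·.2)).or (d.get? k) := by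
  induction qs generalizing d with
  | nil => simp
  | cons q qs ih =>
    rw [List.foldl_cons, ih, List.reverse_cons, List.find?_append]
    cases hf : qs.reverse.find? (fun q => q.1 == k) with
    | some v => simp
    | none =>
      by_cases hk : q.1 = k
      · subst hk; simp [PySem.Dict.get?_insert_self]
      · simp [hk, PySem.Dict.get?_insert_of_ne d q.2 (Ne.symm hk)]

-- lookup after inserting a fixed value function along a key list
theorem pv_get?_foldl_insKeys {κ ν : Type} [BEq κ] [LawfulBEq κ]
    (ks : List κ) (v : κ → ν) (d : PySem.Dict κ ν) (k : κ) :
    (ks.foldl (fun m c => m.insert c (v c)) d).get? k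
      = if k ∈ ks then some (v k) else d.get? k := by
  induction ks generalizing d with
  | nil => simp
  | cons c cs ih =>
    by_cases hm : k ∈ cs
    · simp [List.foldl_cons, ih, hm]
    · by_cases hk : k = c
      · subst hk; simp [List.foldl_cons, ih, hm, PySem.Dict.get?_insert_self]
      · simp [List.foldl_cons, ih, hm, hk, PySem.Dict.get?_insert_of_ne d (v c) hk]

-- keys after an insert-if-new loop are the same Set.update as the unconditional loop's
theorem pv_keys_foldl_insNew {κ ν : Type} [BEq κ] [LawfulBEq κ]
    (qs : List (κ × ν)) (d : PySem.Dict κ ν) :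
    (qs.foldl (fun m q => if m.contains q.1 then m else m.insert q.1 q.2) d).keys
      = PySem.Set.update d.keys (qs.map (·.1)) := by
  induction qs generalizing d with
  | nil => simp [PySem.Set.update]
  | cons q qs ih =>
    have h1 := PySem.Dict.keys_foldl_insert_key (q :: qs) (·.1) (fun _ q => q.2) d
    have h2 := PySem.Dict.keys_foldl_insert_key qs (·.1) (fun _ q => q.2) (d.insert q.1 q.2)
    simp only [List.foldl_cons] at h1
    rw [h2] at h1
    by_cases hc : d.contains q.1
    · rw [List.foldl_cons, if_pos hc, ih]
      rw [PySem.Dict.keys_insert_of_contains _ _ hc] at h1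
      exact h1.symm ▸ rfl
    · have hc' : d.contains q.1 = false := by simpa using hc
      rw [List.foldl_cons, if_neg (by simp [hc']), ih,
        PySem.Dict.keys_insert_of_not_contains _ _ hc']
      rw [PySem.Dict.keys_insert_of_not_contains _ _ hc'] at h1
      exact h1


-- the two ports agree on every input
theorem pv_main (cards : List (List (String × String))) :
    cards_by_id_py cards = cards_by_id_py_alt cards := by
  simp only [cards_by_id_py, cards_by_id_py_alt]
  rw [pvA_loop]
  have hids : cards.map (fun card => ((PySem.Dict.mk card).get? "id").getD "")
      = (pvPairs cards).map (·.1) := by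
    simp [pvPairs, pvCid]
  rw [hids]
  set qs := (pvPairs cards).filter (fun q => !(q.1 == "")) with hqs
  -- the reversed zip is the reversed pair list
  have hzip : (((pvPairs cards).map (·.1)).reverse).zip cards.reverse
      = (pvPairs cards).reverse := by
    rw [← List.map_reverse]
    have : (pvPairs cards).reverse = cards.reverse.map (fun c => (pvCid c, c)) := by
      simp [pvPairs]
    rw [this, List.map_map]
    have hcomp : ((fun (x : String × List (String × String)) => x.1) ∘
        (fun c => (pvCid c, c))) = pvCid := rfl
    rw [hcomp, ← List.map_prod_right_eq_zip]
  rw [hzip]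
  -- the overwrite pass over the reversed pairs, guard removed
  have h1 := pv_foldl_skip_filter (fun (p : String × List (String × String)) => p.1 == "")
    (fun first p => first.insert p.1 p.2) (pvPairs cards).reverse PySem.Dict.empty
  simp only [] at h1
  rw [h1, List.filter_reverse]
  -- the rebuild pass, guard removed
  have h2 := pv_foldl_skip_filter (fun (cid : String) => cid == "")
    (fun m cid => m.insert cid
      (((qs.reverse.foldl (fun first p => first.insert p.1 p.2)
          PySem.Dict.empty).get? cid).getD []))
    ((pvPairs cards).map (·.1)) PySem.Dict.empty
  simp only [] at h2
  rw [h2]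
  have hks : ((pvPairs cards).map (·.1)).filter (fun cid => !(cid == ""))
      = qs.map (·.1) := by
    rw [hqs, List.filter_map]; rfl
  rw [hks]
  -- both sides: same (nodup) keys, same value at every key
  set first := qs.reverse.foldl (fun m (p : String × List (String × String)) =>
      m.insert p.1 p.2) PySem.Dict.empty with hfirst
  set A := qs.foldl (fun m q => if m.contains q.1 then m else m.insert q.1 q.2)
      PySem.Dict.empty with hA
  set B := (qs.map (·.1)).foldl
      (fun m cid => m.insert cid ((first.get? cid).getD [])) PySem.Dict.empty with hB
  have hkeysA : A.keys = PySem.Set.update [] (qs.map (·.1)) := by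
    rw [hA, pv_keys_foldl_insNew]; simp
  have hkeysB : B.keys = PySem.Set.update [] (qs.map (·.1)) := by
    rw [hB]
    have := PySem.Dict.keys_foldl_insert_key (qs.map (·.1)) (fun c => c)
      (fun m cid => (first.get? cid).getD [])
      (PySem.Dict.empty : PySem.Dict String (List (String × String)))
    simpa using this
  have hnodupB : B.keys.Nodup := by
    rw [hB]
    exact PySem.Dict.nodup_keys_foldl_insert_key _ _ _ _ PySem.Dict.nodup_keys_empty
  have hnodupA : A.keys.Nodup := by rw [hkeysA, ← hkeysB]; exact hnodupB
  rw [PySem.Dict.items_eq_map_keys A hnodupA [], PySem.Dict.items_eq_map_keys B hnodupB [],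
      hkeysA, hkeysB]
  apply List.map_congr_left
  intro k hkmem
  have hkin : k ∈ qs.map (·.1) := by
    have : k ∈ ([] : List String) ∨ k ∈ qs.map (·.1) := by
      simpa [pysem] using hkmem
    simpa using this
  -- first occurrence of k in qs
  have hsome : (qs.find? (fun q => q.1 == k)).isSome := by
    rw [List.find?_isSome]
    obtain ⟨q0, hq0mem, hq0⟩ := List.mem_map.mp hkin
    exact ⟨q0, hq0mem, by simp [hq0]⟩
  obtain ⟨q0, hq0⟩ := Option.isSome_iff_exists.mp hsome
  have hgetA : A.get? k = some q0.2 := by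
    rw [hA, pv_get?_foldl_insNew, hq0]; simp
  have hfirstk : first.get? k = some q0.2 := by
    rw [hfirst, pv_get?_foldl_insAll, List.reverse_reverse, hq0]; simp
  have hgetB : B.get? k = some q0.2 := by
    rw [hB, pv_get?_foldl_insKeys, if_pos hkin, hfirstk]; rfl
  rw [PySem.Dict.getD_eq_get?_getD, PySem.Dict.getD_eq_get?_getD, hgetA, hgetB]

theorem cards_by_id_py_spec : Claim_equal_cards_by_id_py := by
  intro cards _
  unfold Spec_cards_by_id_py
  exact pv_main cards
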